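-- pv_equiv track=rewrite | github.com/DRMacIver/pbtkit | tools/build_book.py | strip_generators
-- ===== SOURCE A (Python) =====
-- def strip_generators(source: str) -> str:
--     """Remove the generator library section from compiled output.
--
--     Generator functions (integers, just, nothing, etc.) are defined at the
--     end of the compiled file.  We look for the first top-level ``def`` or
--     ``class`` that defines a Generator-returning function after the main
--     infrastructure, and strip everything from there to the end.
--
--     The heuristic: find the first ``def`` whose body contains
--     ``Generator[`` that appears after PbtkitState — these are the
--     user-facing generator functions.
--     """
--     lines = source.splitlines(keepends=True)
--
--     # Find the end of the PbtkitState class and infrastructure.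
--     # Generator functions are the last section in the compiled output.
--     # We look for the first top-level def that returns a Generator.
--     generator_start = None
--     for i, line in enumerate(lines):
--         # Generator functions are top-level defs returning Generator[...]
--         if line.startswith("def ") and "Generator[" in line:
--             generator_start = i
--             break
--
--     if generator_start is None:
--         return source
--
--     # Walk back to include any preceding blank lines / comments
--     while generator_start > 0 and lines[generator_start - 1].strip() == "":
--         generator_start -= 1
--
--     return "".join(lines[:generator_start])
-- ===== SOURCE B (Python) =====
-- def strip_generators(source: str) -> str:
--     """Single forward pass: accumulate kept lines, buffering trailing blank
--     lines in `pending` so they are discarded when the generator section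
--     starts, and flushed when no generator def exists."""
--     result = []
--     pending = []
--     for line in source.splitlines(keepends=True):
--         if line.startswith("def ") and "Generator[" in line:
--             return "".join(result)
--         if line.strip() == "":
--             pending.append(line)
--         else:
--             result.extend(pending)
--             pending = []
--             result.append(line)
--     result.extend(pending)
--     return "".join(result)
-- ===== Notes on version B (the rewrite author's own statement) =====
-- stated objective: simpler
-- what changed: Replaced A's find-the-generator-index then walk-back-over-blank-lines then take-and-join with a single forward pass that keeps a result accumulator and a pending-blank-line buffer, dropped on the generator def and flushed at end of input.
import Mathlib
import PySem

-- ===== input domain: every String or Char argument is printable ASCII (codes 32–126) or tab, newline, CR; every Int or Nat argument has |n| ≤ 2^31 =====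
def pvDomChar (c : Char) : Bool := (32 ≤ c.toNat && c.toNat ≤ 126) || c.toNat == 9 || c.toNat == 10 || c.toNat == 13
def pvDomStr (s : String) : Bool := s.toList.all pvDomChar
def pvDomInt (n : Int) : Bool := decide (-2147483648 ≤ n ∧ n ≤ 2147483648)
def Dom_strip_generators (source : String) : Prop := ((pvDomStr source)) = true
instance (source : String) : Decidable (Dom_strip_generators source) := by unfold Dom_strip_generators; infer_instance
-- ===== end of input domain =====

-- B replaces A's find-index + walk-back-over-blank-lines + take with a single
-- forward pass carrying a result accumulator and a pending-blank-line buffer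
-- (objective: simpler decomposition, same cost).

-- hand port of str.splitlines(keepends=True): exact on the task domain, where the
-- only line-break characters occurring are '\n' and '\r' (and the pair "\r\n").
def pvSplitK : List Char → List (List Char)
  | [] => []
  | '\r' :: '\n' :: rest => ['\r', '\n'] :: pvSplitK rest
  | '\r' :: rest => ['\r'] :: pvSplitK rest
  | '\n' :: rest => ['\n'] :: pvSplitK rest
  | c :: rest =>
    match pvSplitK rest with
    | [] => [[c]]
    | l :: ls => (c :: l) :: ls

-- the line test: line.startswith("def ") and "Generator[" in line
def pvIsGen (l : List Char) : Bool :=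
  PySem.Chars.startswith l "def ".toList && PySem.Chars.isIn "Generator[".toList l

-- blank line test: line.strip() == ""
def pvBlank (l : List Char) : Bool := PySem.Chars.strip l == []

-- ===== PORT A =====
-- the walk-back loop: while generator_start > 0 and lines[generator_start-1].strip() == ""
def pvWalkBack (lines : List (List Char)) : Nat → Nat
  | 0 => 0
  | g + 1 => if pvBlank (lines.getD g []) then pvWalkBack lines g else g + 1

def strip_generators (source : String) : String :=
  let lines := pvSplitK source.toList
  match lines.findIdx? pvIsGen with        -- the enumerate loop with break
  | none => source
  | some i => String.ofList (List.flatten (lines.take (pvWalkBack lines i)))  -- "".join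

-- ===== PORT B =====
def pvGoB : List (List Char) → List (List Char) → List (List Char) → List Char
  | [], res, pend => (res ++ pend).flatten                    -- flush pending, "".join
  | l :: ls, res, pend =>
    if pvIsGen l then res.flatten                             -- early return, pending dropped
    else if pvBlank l then pvGoB ls res (pend ++ [l])
    else pvGoB ls (res ++ pend ++ [l]) []

def strip_generators_alt (source : String) : String :=
  String.ofList (pvGoB (pvSplitK source.toList) [] [])

-- ===== PRECONDITION & SPEC =====
def Spec_strip_generators (source : String) (out : String) : Prop := out = strip_generators_alt source
instance (source : String) (out : String) : Decidable (Spec_strip_generators source out) := by unfold Spec_strip_generators; infer_instance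

-- ===== CLAIM (what is proved, stated in full; the proofs are below) =====
def Claim_equal_strip_generators : Prop := ∀ (source : String), Dom_strip_generators source → Spec_strip_generators source (strip_generators source)

-- ===== LEMMAS AND PROOFS =====

-- remove trailing blank lines
def pvDropB (ls : List (List Char)) : List (List Char) :=
  (ls.reverse.dropWhile pvBlank).reverse

theorem pvDropB_append_singleton (xs : List (List Char)) (l : List Char) :
    pvDropB (xs ++ [l]) = if pvBlank l then pvDropB xs else xs ++ [l] := by
  unfold pvDropB
  rw [List.reverse_append, List.reverse_singleton]
  by_cases h : pvBlank l
  · simp [h]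
  · simp [h]

theorem pvSplitK_cons_other (c : Char) (rest : List Char)
    (h2 : c = '\r' → False) (h3 : c = '\n' → False) :
    pvSplitK (c :: rest) =
      match pvSplitK rest with
      | [] => [[c]]
      | l :: ls => (c :: l) :: ls := by
  rw [pvSplitK] <;> simp_all

theorem pvFlatten_splitK (cs : List Char) : (pvSplitK cs).flatten = cs := by
  induction cs using pvSplitK.induct with
  | case1 => rfl
  | case2 rest ih => simpa [pvSplitK] using ih
  | case3 rest h ih => simp_all [pvSplitK]
  | case4 rest ih => simpa [pvSplitK] using ih
  | case5 c rest h1 h2 h3 hnil ih =>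
    rw [pvSplitK_cons_other c rest h2 h3, hnil]
    have hr : rest = [] := by rw [hnil] at ih; simpa using ih
    simp [hr]
  | case6 c rest h1 h2 h3 l ls hcons ih =>
    rw [pvSplitK_cons_other c rest h2 h3, hcons]
    rw [hcons] at ih; simpa using ih

-- A's walk-back equals removing trailing blank lines from the prefix
theorem pvWalkBack_take (lines : List (List Char)) (i : Nat) (hi : i ≤ lines.length) :
    lines.take (pvWalkBack lines i) = pvDropB (lines.take i) := by
  induction i with
  | zero => simp [pvWalkBack, pvDropB]
  | succ n ih =>
    have hn : n < lines.length := hi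
    have htake : lines.take (n + 1) = lines.take n ++ [lines[n]] := by
      rw [List.take_add_one]
      simp [List.getElem?_eq_getElem hn]
    have hget : lines.getD n [] = lines[n] := List.getD_eq_getElem lines [] hn
    rw [pvWalkBack, htake, pvDropB_append_singleton, hget]
    by_cases hb : pvBlank lines[n]
    · rw [if_pos hb, if_pos hb]; exact ih (Nat.le_of_lt hn)
    · rw [if_neg hb, if_neg hb, ← htake]

-- the loop invariant for B's single pass
theorem pvGoB_spec (ls res pend : List (List Char))
    (hp : ∀ l ∈ pend, pvBlank l = true)
    (hd : pvDropB (res ++ pend) = res) :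
    pvGoB ls res pend =
      match ls.findIdx? pvIsGen with
      | none => (res ++ pend ++ ls).flatten
      | some i => (pvDropB (res ++ pend ++ ls.take i)).flatten := by
  induction ls generalizing res pend with
  | nil => simp [pvGoB]
  | cons l ls ih =>
    rw [pvGoB]
    by_cases hg : pvIsGen l
    · simp only [hg, if_true]
      rw [List.findIdx?_cons, hg]
      simp [hd]
    · rw [List.findIdx?_cons]
      simp only [hg]
      by_cases hb : pvBlank l
      · simp only [hb, if_true]
        have hp' : ∀ x ∈ pend ++ [l], pvBlank x = true := by
          intro x hx
          rcases List.mem_append.mp hx with h | h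
          · exact hp x h
          · simp at h; subst h; exact hb
        have hd' : pvDropB (res ++ (pend ++ [l])) = res := by
          rw [← List.append_assoc, pvDropB_append_singleton, if_pos hb]
          exact hd
        rw [ih res (pend ++ [l]) hp' hd']
        cases hfi : ls.findIdx? pvIsGen with
        | none => simp
        | some i => simp [List.take_succ_cons, List.append_assoc]
      · simp only [hb]
        have hd' : pvDropB (res ++ pend ++ [l] ++ []) = res ++ pend ++ [l] := by
          rw [List.append_nil, pvDropB_append_singleton, if_neg (by simp [hb])]
        rw [ih (res ++ pend ++ [l]) [] (by simp) hd']
        cases hfi : ls.findIdx? pvIsGen with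
        | none => simp
        | some i => simp [List.take_succ_cons, List.append_assoc]

theorem pvFindIdx?_lt {p : List Char → Bool} {ls : List (List Char)} {i : Nat}
    (h : ls.findIdx? p = some i) : i < ls.length :=
  List.findIdx?_eq_some_iff_findIdx_eq.mp h |>.1

-- ===== VERDICT (by name: the statement is the Claim_ definition above) =====
theorem strip_generators_spec : Claim_equal_strip_generators := by
  intro source _
  unfold Spec_strip_generators strip_generators strip_generators_alt
  have hgo := pvGoB_spec (pvSplitK source.toList) [] [] (by simp) (by simp [pvDropB])
  cases hfi : (pvSplitK source.toList).findIdx? pvIsGen with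
  | none =>
    rw [hfi] at hgo
    simp only [hfi]
    rw [hgo]
    simp [pvFlatten_splitK]
  | some i =>
    rw [hfi] at hgo
    simp only [hfi]
    rw [hgo, pvWalkBack_take _ _ (Nat.le_of_lt (pvFindIdx?_lt hfi))]
    simp
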